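-- pv_equiv track=rewrite | github.com/idinyte/AI_Course-SDU | Lab5/Homework/nim.py | successors_of
-- ===== SOURCE A (Python) =====
-- def successors_of(state):
--     """
--     returns a list of possible states
--     """
--     successors = []
--     for i in range(len(state)):
--         if state[i] >= 3:
--             middle = state[i] // 2
--             for num1 in range(1, middle + 1):
--                 num2 = state[i] - num1
--                 if num1 != num2:
--                     new_state = sorted(state[:i] + [num1, num2] + state[i + 1:], reverse = True)
--                     if new_state not in successors:
--                         successors.append(new_state)
--
--     return successors
-- ===== SOURCE B (Python) =====
-- def successors_of(state):
--     """
--     returns a list of possible states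
--     """
--     seen = set()
--     result = []
--     for i, v in enumerate(state):
--         if v < 3 or v in seen:
--             continue
--         seen.add(v)
--         rest = state[:i] + state[i + 1:]
--         for num1 in range(1, (v + 1) // 2):
--             result.append(sorted(rest + [num1, v - num1], reverse=True))
--     return result
-- ===== Notes on version B (the rewrite author's own statement) =====
-- stated objective: faster
-- what changed: B drops A's membership test of every generated successor against the whole result list and instead dedupes on the pile VALUE with a seen-set (equal pile values yield identical successor lists, distinct values can never collide), appending each split unconditionally.
import Mathlib
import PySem

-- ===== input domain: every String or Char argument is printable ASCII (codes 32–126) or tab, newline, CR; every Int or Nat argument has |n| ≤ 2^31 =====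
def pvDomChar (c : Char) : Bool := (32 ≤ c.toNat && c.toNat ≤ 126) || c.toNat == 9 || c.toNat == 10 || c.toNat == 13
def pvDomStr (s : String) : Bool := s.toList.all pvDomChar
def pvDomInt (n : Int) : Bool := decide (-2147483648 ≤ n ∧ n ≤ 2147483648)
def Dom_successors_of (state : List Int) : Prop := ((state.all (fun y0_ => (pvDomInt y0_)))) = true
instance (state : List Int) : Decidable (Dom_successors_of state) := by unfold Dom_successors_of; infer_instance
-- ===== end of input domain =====

-- B replaces A's quadratic membership check of each generated state against the whole result list
-- by a seen-set of already-processed pile VALUES (equal values reproduce identical results, distinct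
-- values can never collide), appending every generated split unconditionally.

-- ===== PORT A =====
def successors_of (state : List Int) : List (List Int) :=
  (PySem.List.pyRange 0 (state.length : Int) 1).foldl (fun successors i =>
    if 3 ≤ PySem.List.pyGetD state i 0 then
      let middle := PySem.Int.floordiv (PySem.List.pyGetD state i 0) 2
      (PySem.List.pyRange 1 (middle + 1) 1).foldl (fun successors num1 =>
        let num2 := PySem.List.pyGetD state i 0 - num1
        if num1 ≠ num2 then
          let new_state := PySem.List.sorted
            (PySem.List.slice state none (some i) ++ [num1, num2] ++
              PySem.List.slice state (some (i + 1)) none) (fun x => x) true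
          if new_state ∈ successors then successors else successors ++ [new_state]
        else successors) successors
    else successors) []

-- ===== PORT B =====
def successors_of_alt (state : List Int) : List (List Int) :=
  ((PySem.List.enumerate state).foldl
    (fun (acc : PySem.Set Int × List (List Int)) iv =>
      if iv.2 < 3 ∨ PySem.Set.contains acc.1 iv.2 then acc
      else
        let seen := PySem.Set.add acc.1 iv.2
        let rest := PySem.List.slice state none (some iv.1) ++
                    PySem.List.slice state (some (iv.1 + 1)) none
        (seen, (PySem.List.pyRange 1 (PySem.Int.floordiv (iv.2 + 1) 2) 1).foldl
          (fun result num1 =>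
            result ++ [PySem.List.sorted (rest ++ [num1, iv.2 - num1]) (fun x => x) true])
          acc.2))
    (PySem.Set.empty, [])).2

-- ===== PRECONDITION & SPEC =====
def Spec_successors_of (state : List Int) (out : List (List Int)) : Prop := out = successors_of_alt state
instance (state : List Int) (out : List (List Int)) : Decidable (Spec_successors_of state out) := by unfold Spec_successors_of; infer_instance

-- ===== CLAIM (what is proved, stated in full; the proofs are below) =====
def Claim_equal_successors_of : Prop := ∀ (state : List Int), Dom_successors_of state → Spec_successors_of state (successors_of state)

-- ===== LEMMAS AND PROOFS =====

-- value of pile k (indices are always in range here)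
def gd (state : List Int) (k : Nat) : Int := state.getD k 0
-- the state with pile k removed
def rst (state : List Int) (k : Nat) : List Int := state.take k ++ state.drop (k+1)
-- the successor produced by splitting off n1 from a pile of value v, the rest being r
def out1 (r : List Int) (v n1 : Int) : List Int :=
  PySem.List.sorted (r ++ [n1, v - n1]) (fun x => x) true
-- the split amounts for a pile of value v
def sp1 (v : Int) : List Int := PySem.List.pyRange 1 ((v+1)/2) 1
-- index k holds the first occurrence of its value
def fo (state : List Int) (k : Nat) : Prop := ∀ j, j < k → gd state j ≠ gd state k

-- A's loop body, normalised to Nat indices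
def stepAN (state : List Int) (S : List (List Int)) (k : Nat) : List (List Int) :=
  if 3 ≤ gd state k then
    (PySem.List.pyRange 1 (gd state k / 2 + 1) 1).foldl (fun S n1 =>
      if n1 ≠ gd state k - n1 then
        (if out1 (rst state k) (gd state k) n1 ∈ S then S
         else S ++ [out1 (rst state k) (gd state k) n1])
      else S) S
  else S

-- B's loop body, normalised to Nat indices
def stepBN (state : List Int) (acc : PySem.Set Int × List (List Int)) (k : Nat) :
    PySem.Set Int × List (List Int) :=
  if gd state k < 3 ∨ PySem.Set.contains acc.1 (gd state k) then acc
  else (PySem.Set.add acc.1 (gd state k),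
        acc.2 ++ (sp1 (gd state k)).map (out1 (rst state k) (gd state k)))

lemma fdiv2 (a : Int) : PySem.Int.floordiv a 2 = a / 2 := by
  rw [show PySem.Int.floordiv a 2 = Int.fdiv a 2 from rfl, Int.fdiv_eq_ediv]
  simp

lemma contains_iff (s : PySem.Set Int) (x : Int) :
    PySem.Set.contains s x = true ↔ x ∈ s := by
  show List.contains s x = true ↔ x ∈ s
  simp

lemma sortedRev_eq_of_perm (xs ys : List Int) (h : xs.Perm ys) :
    PySem.List.sorted xs (fun x => x) true = PySem.List.sorted ys (fun x => x) true := by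
  have p1 := PySem.List.sorted_perm xs (fun x => x) true
  have p2 := PySem.List.sorted_perm ys (fun x => x) true
  exact List.eq_of_perm_of_sorted (fun a b _ _ h1 h2 => le_antisymm h2 h1)
    (PySem.List.sorted_pairwise_rev xs (fun x => x))
    (PySem.List.sorted_pairwise_rev ys (fun x => x))
    (p1.trans (h.trans p2.symm))

lemma perm_of_out1_eq {r r' : List Int} {v w a b : Int}
    (h : out1 r v a = out1 r' w b) : (r ++ [a, v - a]).Perm (r' ++ [b, w - b]) := by
  have p1 := PySem.List.sorted_perm (r ++ [a, v - a]) (fun x => x) true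
  have p2 := PySem.List.sorted_perm (r' ++ [b, w - b]) (fun x => x) true
  rw [out1, out1] at h
  rw [h] at p1
  exact p1.symm.trans p2

lemma perm_rst (state : List Int) (k : Nat) (hk : k < state.length) :
    (gd state k :: rst state k).Perm state := by
  have hdrop : state[k] :: state.drop (k+1) = state.drop k := List.getElem_cons_drop hk
  have hsplit : state.take k ++ state[k] :: state.drop (k+1) = state := by
    rw [hdrop]; exact List.take_append_drop k state
  have hperm := (List.perm_middle (a := state[k]) (l₁ := state.take k)
    (l₂ := state.drop (k+1))).symm
  rw [hsplit] at hperm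
  unfold gd rst
  rw [List.getD_eq_getElem state 0 hk]
  exact hperm

lemma count_app2 (r : List Int) (x y c : Int) :
    (r ++ [x, y]).count c = r.count c + (if x = c then 1 else 0) + (if y = c then 1 else 0) := by
  simp [List.count_append, List.count_cons]
  split_ifs <;> omega

lemma mem_sp1 {v n1 : Int} : n1 ∈ sp1 v ↔ 1 ≤ n1 ∧ n1 < (v+1)/2 := by
  rw [sp1]; exact PySem.List.mem_pyRange_one

-- the central collision lemma: two splits yield the same successor only if the pile values agree
lemma values_eq_of_out1_eq (state : List Int) (j k : Nat)
    (hj : j < state.length) (hk : k < state.length) {a b : Int}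
    (ha : a ∈ sp1 (gd state j)) (hb : b ∈ sp1 (gd state k))
    (heq : out1 (rst state j) (gd state j) a = out1 (rst state k) (gd state k) b) :
    gd state j = gd state k := by
  obtain ⟨ha1, ha2⟩ := mem_sp1.1 ha
  obtain ⟨hb1, hb2⟩ := mem_sp1.1 hb
  have hp := perm_of_out1_eq heq
  have hc := hp.count_eq (gd state k)
  rw [count_app2, count_app2] at hc
  have hpj := (perm_rst state j hj).count_eq (gd state k)
  have hpk := (perm_rst state k hk).count_eq (gd state k)
  simp only [List.count_cons, beq_iff_eq] at hpj hpk
  by_contra hne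
  split_ifs at hc hpj hpk <;> omega

-- splits of one pile are pairwise distinct
lemma out1_inj (r : List Int) (v : Int) {a b : Int}
    (ha : a ∈ sp1 v) (hb : b ∈ sp1 v) (h : out1 r v a = out1 r v b) : a = b := by
  obtain ⟨ha1, ha2⟩ := mem_sp1.1 ha
  obtain ⟨hb1, hb2⟩ := mem_sp1.1 hb
  have hp := perm_of_out1_eq h
  have hca := hp.count_eq a
  rw [count_app2, count_app2] at hca
  by_contra hne
  split_ifs at hca <;> omega

lemma filter_range_eq_sp1 {v : Int} (h3 : 3 ≤ v) :
    (PySem.List.pyRange 1 (v/2 + 1) 1).filter (fun n1 => decide (n1 ≠ v - n1)) = sp1 v := by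
  by_cases he : v % 2 = 0
  · rw [PySem.List.pyRange_one_succ_right (by omega : (1:Int) ≤ v/2), List.filter_append]
    have hall : (PySem.List.pyRange 1 (v/2)).filter (fun n1 => decide (n1 ≠ v - n1))
        = PySem.List.pyRange 1 (v/2) := by
      apply List.filter_eq_self.2
      intro a hamem
      rw [PySem.List.mem_pyRange_one] at hamem
      simp only [decide_eq_true_eq]
      omega
    have hone : [v/2].filter (fun n1 => decide (n1 ≠ v - n1)) = [] := by
      simp only [List.filter_cons, List.filter_nil]
      rw [if_neg (by simp; omega)]
    rw [hall, hone, List.append_nil, sp1]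
    congr 1
    omega
  · rw [sp1, show v/2 + 1 = (v+1)/2 from by omega]
    apply List.filter_eq_self.2
    intro a hamem
    rw [PySem.List.mem_pyRange_one] at hamem
    simp only [decide_eq_true_eq]
    omega

lemma fold_dedup_all_mem (p : Int → Prop) [DecidablePred p] (g : Int → List Int) :
    ∀ (xs : List Int) (S : List (List Int)), (∀ x ∈ xs, p x → g x ∈ S) →
    xs.foldl (fun S n1 => if p n1 then (if g n1 ∈ S then S else S ++ [g n1]) else S) S = S := by
  intro xs
  induction xs with
  | nil => intro S _; rfl
  | cons x xs ih =>
    intro S h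
    simp only [List.foldl_cons]
    by_cases hp : p x
    · rw [if_pos hp, if_pos (h x (by simp) hp)]
      exact ih S (fun y hy hpy => h y (by simp [hy]) hpy)
    · rw [if_neg hp]
      exact ih S (fun y hy hpy => h y (by simp [hy]) hpy)

lemma fold_dedup_fresh (p : Int → Prop) [DecidablePred p] (g : Int → List Int) :
    ∀ (xs : List Int) (S : List (List Int)), (∀ x ∈ xs, p x → g x ∉ S) →
    ((xs.filter (fun x => decide (p x))).map g).Nodup →
    xs.foldl (fun S n1 => if p n1 then (if g n1 ∈ S then S else S ++ [g n1]) else S) S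
      = S ++ (xs.filter (fun x => decide (p x))).map g := by
  intro xs
  induction xs with
  | nil => intro S _ _; simp
  | cons x xs ih =>
    intro S hfresh hnd
    by_cases hp : p x
    · have hfil : (x :: xs).filter (fun x => decide (p x))
          = x :: xs.filter (fun x => decide (p x)) := by simp [hp]
      rw [hfil] at hnd ⊢
      simp only [List.map_cons, List.nodup_cons] at hnd
      simp only [List.foldl_cons, if_pos hp, if_neg (hfresh x (by simp) hp)]
      rw [ih (S ++ [g x]) ?_ hnd.2]
      · simp
      · intro y hy hpy
        simp only [List.mem_append, List.mem_singleton, not_or]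
        refine ⟨hfresh y (by simp [hy]) hpy, ?_⟩
        intro hgy
        exact hnd.1 (by rw [← hgy]; exact List.mem_map_of_mem (List.mem_filter.2 ⟨hy, by simp [hpy]⟩))
    · have hfil : (x :: xs).filter (fun x => decide (p x))
          = xs.filter (fun x => decide (p x)) := by simp [hp]
      rw [hfil] at hnd ⊢
      simp only [List.foldl_cons, if_neg hp]
      exact ih S (fun y hy hpy => hfresh y (by simp [hy]) hpy) hnd

lemma foldl_app_map {α β : Type} (g : α → β) :
    ∀ (xs : List α) (r : List β), xs.foldl (fun r a => r ++ [g a]) r = r ++ xs.map g := by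
  intro xs
  induction xs with
  | nil => intro r; simp
  | cons x xs ih => intro r; simp [ih]

lemma exists_fo (state : List Int) : ∀ j : Nat, ∃ j0, j0 ≤ j ∧ gd state j0 = gd state j ∧ fo state j0 := by
  intro j
  induction j using Nat.strong_induction_on with
  | _ j ih =>
    by_cases h : ∃ j', j' < j ∧ gd state j' = gd state j
    · obtain ⟨j', hj', he⟩ := h
      obtain ⟨j0, h0, he0, hf⟩ := ih j' hj'
      exact ⟨j0, by omega, he0.trans he, hf⟩
    · push_neg at h
      exact ⟨j, le_rfl, rfl, fun j' hj' => h j' hj'⟩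

lemma sort3_eq (state : List Int) (k : Nat) (n1 v : Int) :
    PySem.List.sorted (state.take k ++ [n1, v - n1] ++ state.drop (k+1)) (fun x => x) true
      = PySem.List.sorted ((state.take k ++ state.drop (k+1)) ++ [n1, v - n1]) (fun x => x) true := by
  apply sortedRev_eq_of_perm
  apply List.perm_iff_count.2
  intro c
  simp only [List.count_append]
  omega

lemma A_eq (state : List Int) :
    successors_of state = (List.range state.length).foldl (stepAN state) [] := by
  unfold successors_of stepAN
  rw [PySem.List.pyRange_zero_nat, List.foldl_map]
  congr 1
  funext S k
  simp only [PySem.List.pyGetD_natCast, PySem.List.slice_to_natCast, fdiv2,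
    show ∀ n : Nat, ((n : Int) + 1) = (((n + 1 : Nat)) : Int) from fun n => by push_cast; ring,
    PySem.List.slice_from_natCast, gd, rst, out1, sort3_eq]

lemma B_eq (state : List Int) :
    successors_of_alt state
      = ((List.range state.length).foldl (stepBN state) (PySem.Set.empty, [])).2 := by
  unfold successors_of_alt stepBN
  rw [PySem.List.enumerate_eq_map_pyRange state 0,
    show PySem.List.len state = ((state.length : Nat) : Int) from rfl,
    PySem.List.pyRange_zero_nat, List.map_map, List.foldl_map]
  congr 2
  funext acc k
  simp only [Function.comp, PySem.List.pyGetD_natCast, PySem.List.slice_to_natCast, fdiv2,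
    show ∀ n : Nat, ((n : Int) + 1) = (((n + 1 : Nat)) : Int) from fun n => by push_cast; ring,
    PySem.List.slice_from_natCast, foldl_app_map, gd, rst, sp1]
  rfl

theorem main_inv (state : List Int) : ∀ (m k : Nat) (seen : PySem.Set Int) (S : List (List Int)),
    k + m = state.length →
    (∀ v, PySem.Set.contains seen v = true ↔ ∃ j, j < k ∧ gd state j = v ∧ 3 ≤ v) →
    (∀ j, j < k → fo state j → 3 ≤ gd state j →
      ∀ n1 ∈ sp1 (gd state j), out1 (rst state j) (gd state j) n1 ∈ S) →
    (∀ l ∈ S, ∃ j, j < k ∧ 3 ≤ gd state j ∧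
      ∃ n1 ∈ sp1 (gd state j), l = out1 (rst state j) (gd state j) n1) →
    (List.range' k m).foldl (stepAN state) S
      = ((List.range' k m).foldl (stepBN state) (seen, S)).2 := by
  intro m
  induction m with
  | zero => intro k seen S _ _ _ _; rfl
  | succ m ih =>
    intro k seen S hlen hseen hinS hfromS
    have hk : k < state.length := by omega
    rw [List.range'_succ]
    simp only [List.foldl_cons]
    by_cases h3 : 3 ≤ gd state k
    · by_cases hcont : PySem.Set.contains seen (gd state k) = true
      · -- the value was processed before: A's membership checks all hit, B skips
        obtain ⟨j0, hj0k, hgd0, _⟩ := (hseen (gd state k)).1 hcont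
        obtain ⟨j1, hj1le, hgd1, hfo1⟩ := exists_fo state j0
        have hj1k : j1 < k := by omega
        have hgd1k : gd state j1 = gd state k := hgd1.trans hgd0
        have hstepB : stepBN state (seen, S) k = (seen, S) := by
          rw [stepBN, if_pos (Or.inr hcont)]
        have hstepA : stepAN state S k = S := by
          rw [stepAN, if_pos h3]
          apply fold_dedup_all_mem (fun n1 => n1 ≠ gd state k - n1)
            (fun n1 => out1 (rst state k) (gd state k) n1)
          intro x hx hpx
          rw [PySem.List.mem_pyRange_one] at hx
          have hxsp : x ∈ sp1 (gd state k) := by rw [mem_sp1]; omega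
          have hperm : (rst state k).Perm (rst state j1) := by
            have p1 := perm_rst state k hk
            have p2 := perm_rst state j1 (by omega)
            rw [hgd1k] at p2
            exact (p1.trans p2.symm).cons_inv
          have hout : out1 (rst state k) (gd state k) x = out1 (rst state j1) (gd state k) x := by
            rw [out1, out1]
            exact sortedRev_eq_of_perm _ _ (hperm.append_right _)
          rw [hout]
          have := hinS j1 hj1k hfo1 (by rw [hgd1k]; exact h3) x (by rw [hgd1k]; exact hxsp)
          rw [hgd1k] at this
          exact this
        rw [hstepA, hstepB]
        apply ih (k+1) seen S (by omega)
        · intro v'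
          rw [hseen v']
          constructor
          · rintro ⟨j, hj, hgd, h3'⟩; exact ⟨j, by omega, hgd, h3'⟩
          · rintro ⟨j, hj, hgd, h3'⟩
            rcases Nat.lt_or_ge j k with hjk | hjk
            · exact ⟨j, hjk, hgd, h3'⟩
            · have : j = k := by omega
              subst this
              exact ⟨j1, hj1k, hgd1k.trans hgd, h3'⟩
        · intro j hj hfoj h3j n1 hn1
          rcases Nat.lt_or_ge j k with hjk | hjk
          · exact hinS j hjk hfoj h3j n1 hn1
          · have : j = k := by omega
            subst this
            exact absurd hgd1k (hfoj j1 hj1k)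
        · intro l hl
          obtain ⟨j, hj, h3j, hn⟩ := hfromS l hl
          exact ⟨j, by omega, h3j, hn⟩
      · -- a fresh pile value: A appends all splits, and so does B
        have hfo_k : fo state k := by
          intro j hj heq
          exact hcont ((hseen (gd state k)).2 ⟨j, hj, heq, h3⟩)
        have hstepA : stepAN state S k
            = S ++ (sp1 (gd state k)).map (out1 (rst state k) (gd state k)) := by
          rw [stepAN, if_pos h3, ← filter_range_eq_sp1 h3]
          apply fold_dedup_fresh
          · intro x hx hpx hmem
            rw [PySem.List.mem_pyRange_one] at hx
            have hxsp : x ∈ sp1 (gd state k) := by rw [mem_sp1]; omega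
            obtain ⟨j, hjk, h3j, n1, hn1, hl⟩ := hfromS _ hmem
            exact hfo_k j hjk (values_eq_of_out1_eq state j k (by omega) hk hn1 hxsp hl.symm)
          · rw [filter_range_eq_sp1 h3]
            exact List.Nodup.map_on
              (fun a hamem b hbmem hab => out1_inj (rst state k) (gd state k) hamem hbmem hab)
              (by rw [sp1]; exact PySem.List.nodup_pyRange_one 1 _)
        have hstepB : stepBN state (seen, S) k
            = (PySem.Set.add seen (gd state k),
               S ++ (sp1 (gd state k)).map (out1 (rst state k) (gd state k))) := by
          have hcond : ¬(gd state k < 3 ∨ PySem.Set.contains seen (gd state k) = true) := by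
            rintro (h | h)
            · omega
            · exact hcont h
          rw [stepBN, if_neg hcond]
        rw [hstepA, hstepB]
        apply ih (k+1) _ _ (by omega)
        · intro v'
          rw [contains_iff, PySem.Set.mem_add]
          constructor
          · rintro (hmem | rfl)
            · obtain ⟨j, hj, hgd, h3'⟩ := (hseen v').1 ((contains_iff seen v').2 hmem)
              exact ⟨j, by omega, hgd, h3'⟩
            · exact ⟨k, by omega, rfl, h3⟩
          · rintro ⟨j, hj, hgd, h3'⟩
            rcases Nat.lt_or_ge j k with hjk | hjk
            · exact Or.inl ((contains_iff seen v').1 ((hseen v').2 ⟨j, hjk, hgd, h3'⟩))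
            · have : j = k := by omega
              subst this
              exact Or.inr hgd.symm
        · intro j hj hfoj h3j n1 hn1
          rcases Nat.lt_or_ge j k with hjk | hjk
          · exact List.mem_append_left _ (hinS j hjk hfoj h3j n1 hn1)
          · have : j = k := by omega
            subst this
            exact List.mem_append_right _ (List.mem_map_of_mem hn1)
        · intro l hl
          rcases List.mem_append.1 hl with hl | hl
          · obtain ⟨j, hj, h3j, hn⟩ := hfromS l hl
            exact ⟨j, by omega, h3j, hn⟩
          · obtain ⟨n1, hn1, hln⟩ := List.mem_map.1 hl
            exact ⟨k, by omega, h3, n1, hn1, hln.symm⟩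
    · -- pile too small to split: both sides skip
      have hstepA : stepAN state S k = S := by rw [stepAN, if_neg h3]
      have hstepB : stepBN state (seen, S) k = (seen, S) := by
        rw [stepBN, if_pos (Or.inl (by omega))]
      rw [hstepA, hstepB]
      apply ih (k+1) seen S (by omega)
      · intro v'
        rw [hseen v']
        constructor
        · rintro ⟨j, hj, hgd, h3'⟩; exact ⟨j, by omega, hgd, h3'⟩
        · rintro ⟨j, hj, hgd, h3'⟩
          rcases Nat.lt_or_ge j k with hjk | hjk
          · exact ⟨j, hjk, hgd, h3'⟩
          · have : j = k := by omega
            subst this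
            exact absurd (hgd ▸ h3') h3
      · intro j hj hfoj h3j n1 hn1
        rcases Nat.lt_or_ge j k with hjk | hjk
        · exact hinS j hjk hfoj h3j n1 hn1
        · have : j = k := by omega
          subst this
          exact absurd h3j h3
      · intro l hl
        obtain ⟨j, hj, h3j, hn⟩ := hfromS l hl
        exact ⟨j, by omega, h3j, hn⟩

-- ===== VERDICT (by name: the statement is the Claim_ definition above) =====
theorem successors_of_spec : Claim_equal_successors_of := by
  intro state _
  show successors_of state = successors_of_alt state
  rw [A_eq, B_eq, List.range_eq_range']
  exact main_inv state state.length 0 PySem.Set.empty []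
    (by omega)
    (by intro v; constructor
        · intro h; exact absurd h (by simp [PySem.Set.empty, PySem.Set.contains])
        · rintro ⟨j, hj, -⟩; omega)
    (by intro j hj; omega)
    (by intro l hl; simp at hl)
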